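-- pv_equiv track=rewrite | github.com/Levurmion/Rosalind | reversal_distance.py | remove_matched
-- ===== SOURCE A (Python) =====
-- def remove_matched(perm1,perm2):
--
--     matched = []
--
--     for i in range(0,len(perm1)):
--         if perm1[i] == perm2[i]:
--             matched.append(perm2[i])
--
--     for match in matched:
--         perm2.remove(match)
--         perm1.remove(match)
--
--     return perm1, perm2
-- ===== SOURCE B (Python) =====
-- def remove_matched(perm1, perm2):
--     # Count how many copies of each value must be dropped (position-matched pairs).
--     drop = {}
--     for i in range(len(perm1)):
--         if perm1[i] == perm2[i]:
--             v = perm2[i]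
--             drop[v] = drop.get(v, 0) + 1
--
--     def filtered(lst):
--         rem = dict(drop)
--         out = []
--         for x in lst:
--             r = rem.get(x, 0)
--             if r > 0:
--                 rem[x] = r - 1
--             else:
--                 out.append(x)
--         return out
--
--     perm1[:] = filtered(perm1)
--     perm2[:] = filtered(perm2)
--     return perm1, perm2
-- ===== Notes on version B (the rewrite author's own statement) =====
-- stated objective: alternative
-- what changed: Replaces the repeated list.remove scans (one scan per matched element) by a drop-count table built in one pass plus a single counter-threading filter pass over each list, preserving first-occurrence-by-value removal and in-place mutation; worst-case quadratic A becomes linear B, though on inputs with few matches the costs are comparable.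
import Mathlib
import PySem

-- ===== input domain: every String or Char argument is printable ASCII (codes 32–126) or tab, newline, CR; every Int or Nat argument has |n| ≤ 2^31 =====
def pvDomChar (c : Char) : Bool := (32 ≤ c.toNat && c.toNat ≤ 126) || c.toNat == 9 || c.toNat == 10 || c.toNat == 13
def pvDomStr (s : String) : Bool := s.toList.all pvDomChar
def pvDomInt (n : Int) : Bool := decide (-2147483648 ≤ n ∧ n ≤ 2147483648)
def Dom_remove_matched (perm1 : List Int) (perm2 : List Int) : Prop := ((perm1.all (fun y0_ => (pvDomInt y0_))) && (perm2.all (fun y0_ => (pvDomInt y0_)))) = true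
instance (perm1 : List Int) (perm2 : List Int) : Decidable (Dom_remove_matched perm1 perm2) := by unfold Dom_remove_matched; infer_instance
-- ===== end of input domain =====

-- B replaces A's repeated list.remove scans by a drop-count table plus one filter pass per list;
-- both Pythons mutate their arguments in place, the equivalence proved here is about the return value.

-- ===== PORT A =====
-- matched = values perm2[i] at positions where perm1[i] == perm2[i]; Pre_ excludes the IndexError (pyGet? = none)
def rmMatchedList (perm1 : List Int) (perm2 : List Int) : List Int :=
  (PySem.List.pyRange 0 perm1.length 1).foldl
    (fun acc i =>
      if (PySem.List.pyGet? perm1 i).getD 0 = (PySem.List.pyGet? perm2 i).getD 0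
      then acc ++ [(PySem.List.pyGet? perm2 i).getD 0] else acc) []

-- list.remove(match): under Pre_ every matched value is present in both lists, so remove? is never none;
-- the getD fallback is only for totality
def rmStep (l : List Int) (m : Int) : List Int := (PySem.List.remove? l m).getD l

def remove_matched (perm1 : List Int) (perm2 : List Int) : List Int × List Int :=
  (rmMatchedList perm1 perm2).foldl
    (fun st m => (rmStep st.1 m, rmStep st.2 m)) (perm1, perm2)

-- ===== PORT B =====
-- drop[v] = number of position-matched pairs with value v
def bDrop (perm1 : List Int) (perm2 : List Int) : PySem.Dict Int Int :=
  (PySem.List.pyRange 0 perm1.length 1).foldl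
    (fun d i =>
      if (PySem.List.pyGet? perm1 i).getD 0 = (PySem.List.pyGet? perm2 i).getD 0
      then d.insert ((PySem.List.pyGet? perm2 i).getD 0)
                    (d.getD ((PySem.List.pyGet? perm2 i).getD 0) 0 + 1)
      else d) PySem.Dict.empty

-- one pass: drop the first rem[x] occurrences of each value x
def bFiltered (drop : PySem.Dict Int Int) (lst : List Int) : List Int :=
  (lst.foldl
    (fun st x =>
      let r := st.1.getD x 0
      if r > 0 then (st.1.insert x (r - 1), st.2) else (st.1, st.2 ++ [x]))
    (drop, [])).2

def remove_matched_alt (perm1 : List Int) (perm2 : List Int) : List Int × List Int :=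
  (bFiltered (bDrop perm1 perm2) perm1, bFiltered (bDrop perm1 perm2) perm2)

-- ===== PRECONDITION & SPEC =====
-- Pre_ excludes exactly the inputs where the Python A raises IndexError (perm2[i] with i ≥ len(perm2)); B raises there too.
def Pre_remove_matched (perm1 : List Int) (perm2 : List Int) : Prop := perm1.length ≤ perm2.length
instance (perm1 : List Int) (perm2 : List Int) : Decidable (Pre_remove_matched perm1 perm2) := by unfold Pre_remove_matched; infer_instance
def pvWitness_remove_matched : List Int × List Int := ([1, 2, 3], [1, 5, 3])

def Spec_remove_matched (perm1 : List Int) (perm2 : List Int) (out : List Int × List Int) : Prop := out = remove_matched_alt perm1 perm2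
instance (perm1 : List Int) (perm2 : List Int) (out : List Int × List Int) : Decidable (Spec_remove_matched perm1 perm2 out) := by unfold Spec_remove_matched; infer_instance

-- ===== CLAIM (what is proved, stated in full; the proofs are below) =====
def Claim_equal_remove_matched : Prop := ∀ (perm1 : List Int) (perm2 : List Int), Dom_remove_matched perm1 perm2 → Pre_remove_matched perm1 perm2 → Spec_remove_matched perm1 perm2 (remove_matched perm1 perm2)

-- ===== LEMMAS AND PROOFS =====

-- spec-level drop pass: drop the first (f v) occurrences of each value v, counts carried as a function
def dropF (f : Int → Int) : List Int → List Int
  | [] => []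
  | x :: xs => if f x > 0 then dropF (fun v => if v = x then f v - 1 else f v) xs
               else x :: dropF f xs

theorem dropF_nonpos (f : Int → Int) (l : List Int) (h : ∀ v, ¬ f v > 0) :
    dropF f l = l := by
  induction l with
  | nil => rfl
  | cons x xs ih => simp [dropF, h x, ih]

theorem bFiltered_eq_dropF (l : List Int) (d : PySem.Dict Int Int) (acc : List Int) :
    (l.foldl
      (fun st x =>
        let r := st.1.getD x 0
        if r > 0 then (st.1.insert x (r - 1), st.2) else (st.1, st.2 ++ [x]))
      (d, acc)).2 = acc ++ dropF (fun v => d.getD v 0) l := by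
  induction l generalizing d acc with
  | nil => simp [dropF]
  | cons x xs ih =>
    by_cases h : d.getD x 0 > 0
    · simp only [List.foldl_cons, dropF, h, if_pos]
      rw [ih]
      congr 1
      congr 1
      funext v
      rw [PySem.Dict.getD_insert]
      by_cases hv : v = x <;> simp [hv]
    · simp only [List.foldl_cons, dropF, h, if_false]
      rw [ih]
      simp
  
-- removing one more first occurrence of m ≡ incrementing the drop count at m
theorem dropF_succ (l : List Int) (f : Int → Int) (m : Int)
    (hf : ∀ v, 0 ≤ f v) :
    dropF (fun v => if v = m then f v + 1 else f v) l = dropF f (rmStep l m) := by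
  induction l generalizing f with
  | nil => simp [dropF, rmStep, PySem.List.remove?]
  | cons x xs ih =>
    by_cases hx : x = m
    · subst hx
      simp only [dropF, rmStep, PySem.List.remove?_cons_self, Option.getD_some, if_pos]
      rw [if_pos (show f x + 1 > 0 by have := hf x; omega)]
      congr 1
      funext v
      by_cases hv : v = x <;> simp [hv]
    · have hrm : rmStep (x :: xs) m = x :: rmStep xs m := by
        rw [rmStep, rmStep, PySem.List.remove?_cons_of_ne xs hx]
        cases PySem.List.remove? xs m <;> simp
      rw [hrm]
      by_cases h : f x > 0
      · simp only [dropF]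
        rw [if_pos (show (if x = m then f x + 1 else f x) > 0 by simp [hx, h]),
            if_pos h]
        have harg : (fun v => if v = x then (if v = m then f v + 1 else f v) - 1
                              else (if v = m then f v + 1 else f v))
            = (fun v => if v = m then (fun w => if w = x then f w - 1 else f w) v + 1
                        else (fun w => if w = x then f w - 1 else f w) v) := by
          funext v
          by_cases hv : v = x
          · subst hv; simp [hx]
          · by_cases hvm : v = m <;> simp [hv, hvm, Ne.symm hx]
        rw [harg, ih _ (by intro v; by_cases hv : v = x <;> simp [hv] <;> [omega; exact hf v])]
      · simp only [dropF]
        rw [if_neg (show ¬ (if x = m then f x + 1 else f x) > 0 by simp [hx, h]),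
            if_neg h, ih f hf]

-- A's removal loop ≡ the spec-level drop pass with the multiset of matched values as counts
theorem foldl_rmStep_eq_dropF (matched : List Int) (l : List Int) :
    matched.foldl rmStep l = dropF (fun v => (matched.count v : Int)) l := by
  induction matched generalizing l with
  | nil =>
    simp only [List.foldl_nil]
    rw [dropF_nonpos]
    intro v; simp
  | cons m ms ih =>
    simp only [List.foldl_cons]
    rw [ih, ← dropF_succ l (fun v => (ms.count v : Int)) m (fun v => by positivity)]
    congr 1
    funext v
    by_cases hv : v = m <;> simp [hv, List.count_cons] <;> try omega

-- B's drop table looks up to the count in A's matched list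
theorem bDrop_getD (perm1 perm2 : List Int) (v : Int) :
    (bDrop perm1 perm2).getD v 0 = ((rmMatchedList perm1 perm2).count v : Int) := by
  rw [bDrop, rmMatchedList,
      PySem.List.foldl_ite_eq_foldl_filter
        (p := fun i => (PySem.List.pyGet? perm1 i).getD 0 = (PySem.List.pyGet? perm2 i).getD 0),
      PySem.List.foldl_append_ite
        (p := fun i => (PySem.List.pyGet? perm1 i).getD 0 = (PySem.List.pyGet? perm2 i).getD 0)
        (f := fun i => (PySem.List.pyGet? perm2 i).getD 0)]
  rw [← List.foldl_map (f := fun i => (PySem.List.pyGet? perm2 i).getD 0)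
        (g := fun (d : PySem.Dict Int Int) x => d.insert x (d.getD x 0 + 1))]
  rw [PySem.Dict.getD_foldl_insert_add_one]
  simp

-- ===== VERDICT (by name: the statement is the Claim_ definition above) =====
theorem remove_matched_spec : Claim_equal_remove_matched := by
  intro perm1 perm2 _ _
  unfold Spec_remove_matched remove_matched remove_matched_alt bFiltered
  rw [PySem.List.foldl_prod_mk (f := rmStep) (g := rmStep)]
  rw [foldl_rmStep_eq_dropF, foldl_rmStep_eq_dropF,
      bFiltered_eq_dropF, bFiltered_eq_dropF]
  have h : (fun v => (bDrop perm1 perm2).getD v 0)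
      = (fun v => ((rmMatchedList perm1 perm2).count v : Int)) := by
    funext v; exact bDrop_getD perm1 perm2 v
  rw [h]
  simp
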